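-- pv_equiv track=rewrite | github.com/nakario/segnmt | segnmt/train/train.py | decode_bpe
-- ===== SOURCE A (Python) =====
-- from typing import List
--
-- def decode_bpe(sentence: List[str], separator: str = '._@@@') -> List[str]:
--     decoded = []
--     merge_to_previous = False
--     for word in sentence:
--         if merge_to_previous:
--             decoded[-1] = decoded[-1][:-len(separator)] + word
--         else:
--             decoded.append(word)
--
--         merge_to_previous = word.endswith(separator)
--     return decoded
-- ===== SOURCE B (Python) =====
-- from typing import List
--
--
-- def decode_bpe(sentence: List[str], separator: str = '._@@@') -> List[str]:
--     result = []
--     buf = []  # parts of the word currently being assembled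
--     for word in sentence:
--         if buf:
--             buf[-1] = buf[-1][:-len(separator)]
--             buf.append(word)
--         else:
--             buf = [word]
--         if not word.endswith(separator):
--             result.append(''.join(buf))
--             buf = []
--     if buf:  # a trailing separator-ending token keeps its separator
--         result.append(''.join(buf))
--     return result
-- ===== Notes on version B (the rewrite author's own statement) =====
-- stated objective: alternative
-- what changed: B replaces A's append-then-rewrite-previous loop (which mutates the last emitted element on each continuation token) with an accumulate-and-flush pass: it buffers the parts of the current word and joins/emits them only when a token does not end with the separator, flushing a leftover buffer unjoined-stripped at the end.
import Mathlib
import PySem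

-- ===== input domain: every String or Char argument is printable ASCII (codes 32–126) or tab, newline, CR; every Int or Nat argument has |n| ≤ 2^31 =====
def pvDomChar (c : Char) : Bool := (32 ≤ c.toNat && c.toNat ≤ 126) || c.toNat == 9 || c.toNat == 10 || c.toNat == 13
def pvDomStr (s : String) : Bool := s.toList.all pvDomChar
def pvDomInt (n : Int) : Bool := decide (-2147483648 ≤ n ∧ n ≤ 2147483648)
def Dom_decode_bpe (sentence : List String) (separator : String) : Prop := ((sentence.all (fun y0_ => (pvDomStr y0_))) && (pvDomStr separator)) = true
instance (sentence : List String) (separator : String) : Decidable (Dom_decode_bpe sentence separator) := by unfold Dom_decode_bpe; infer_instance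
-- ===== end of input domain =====

-- B replaces A's append-then-rewrite-previous BPE merge loop with an accumulate-and-flush
-- pass over a buffer of word parts (alternative decomposition, same cost).


-- ===== PORT A =====
-- loop body of A: if merge_to_previous: decoded[-1] = decoded[-1][:-len(separator)] + word
--                 else: decoded.append(word); merge_to_previous = word.endswith(separator)
def decode_bpe_astep (separator : String) (st : List String × Bool) (word : String) :
    List String × Bool :=
  let decoded :=
    if st.2 then
      st.1.dropLast ++
        [String.ofList (PySem.Chars.slice (st.1.getLastD "").toList none
            (some (-(PySem.Str.len separator))) ++ word.toList)]
    else
      st.1 ++ [word]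
  (decoded, PySem.Str.endswith word separator)

def decode_bpe (sentence : List String) (separator : String) : List String :=
  (sentence.foldl (decode_bpe_astep separator) ([], false)).1

-- ===== PORT B =====
-- loop body of B: if buf: buf[-1] = buf[-1][:-len(separator)]; buf.append(word)
--                 else: buf = [word]
--                 if not word.endswith(separator): result.append(''.join(buf)); buf = []
def decode_bpe_bstep (separator : String) (st : List String × List String) (word : String) :
    List String × List String :=
  let buf :=
    if st.2 ≠ [] then
      st.2.dropLast ++
        [PySem.Str.slice (st.2.getLastD "") none (some (-(PySem.Str.len separator))), word]
    else
      [word]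
  if PySem.Str.endswith word separator = false then
    (st.1 ++ [PySem.Str.join "" buf], [])
  else
    (st.1, buf)

def decode_bpe_alt (sentence : List String) (separator : String) : List String :=
  let st := sentence.foldl (decode_bpe_bstep separator) ([], [])
  if st.2 ≠ [] then st.1 ++ [PySem.Str.join "" st.2] else st.1

-- ===== PRECONDITION & SPEC =====
def Spec_decode_bpe (sentence : List String) (separator : String) (out : List String) : Prop := out = decode_bpe_alt sentence separator
instance (sentence : List String) (separator : String) (out : List String) : Decidable (Spec_decode_bpe sentence separator out) := by unfold Spec_decode_bpe; infer_instance

-- ===== CLAIM (what is proved, stated in full; the proofs are below) =====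
def Claim_equal_decode_bpe : Prop := ∀ (sentence : List String) (separator : String), Dom_decode_bpe sentence separator → Spec_decode_bpe sentence separator (decode_bpe sentence separator)

-- ===== LEMMAS AND PROOFS =====

-- toList is injective on String
lemma pv_str_eq_of_toList {s t : String} (h : s.toList = t.toList) : s = t := by
  have := congrArg String.ofList h
  simpa using this

-- ''.join at the Chars level is flatten
lemma pv_join_nil_flatten (ps : List (List Char)) :
    PySem.Chars.join [] ps = ps.flatten := by
  induction ps with
  | nil => simp [PySem.Chars.join_nil]
  | cons p qs ih =>
    cases qs with
    | nil => simp [PySem.Chars.join_singleton]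
    | cons q rest => simp [PySem.Chars.join_cons_cons, ih]

-- stripping len(sep) chars off xs ++ ys only touches ys when sep is a suffix of ys
-- (and when sep = '' Python's s[:-0] = '' forces xs = [])
lemma pv_slice_append (sep xs ys : List Char)
    (hsuf : sep <:+ ys) (hz : sep = [] → xs = []) :
    PySem.Chars.slice (xs ++ ys) none (some (-(sep.length : Int))) =
      xs ++ PySem.Chars.slice ys none (some (-(sep.length : Int))) := by
  rcases Nat.eq_zero_or_pos sep.length with h0 | hpos
  · have hx : xs = [] := hz (List.length_eq_zero_iff.mp h0)
    subst hx; simp [h0]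
  · have hle : sep.length ≤ ys.length := List.IsSuffix.length_le hsuf
    simp only [PySem.Chars.slice_eq_listSlice]
    rw [PySem.List.slice_to_neg_natCast _ _ hpos, PySem.List.slice_to_neg_natCast _ _ hpos,
      List.take_append]
    congr 1
    · exact List.take_of_length_le (by simp; omega)
    · congr 1; simp; omega

-- the invariant relating A's state (decoded, merge_to_previous) to B's (result, buf)
def pvRel (sep : String) (dec : List String) (m : Bool) (res buf : List String) : Prop :=
  (m = false ∧ buf = [] ∧ dec = res) ∨
  (m = true ∧ ∃ bs b, buf = bs ++ [b] ∧
     dec = res ++ [PySem.Str.join "" buf] ∧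
     PySem.Str.endswith b sep = true ∧
     (sep = "" → ∀ x ∈ bs, x = ""))

lemma pv_join_toList (buf : List String) :
    (PySem.Str.join "" buf).toList = (buf.map String.toList).flatten := by
  rw [PySem.Str.toList_join]
  simpa using pv_join_nil_flatten (buf.map String.toList)

-- A's merged last word equals B's join of the updated buffer
lemma pv_merge_eq (sep w : String) (bs : List String) (b : String)
    (hb : PySem.Str.endswith b sep = true)
    (hz : sep = "" → ∀ x ∈ bs, x = "") :
    String.ofList (PySem.Chars.slice (PySem.Str.join "" (bs ++ [b])).toList none
        (some (-(PySem.Str.len sep))) ++ w.toList) =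
      PySem.Str.join "" (bs ++ [PySem.Str.slice b none (some (-(PySem.Str.len sep))), w]) := by
  apply pv_str_eq_of_toList
  have hsuf : sep.toList <:+ b.toList := by
    rw [PySem.Str.endswith_eq] at hb; exact (PySem.Chars.endswith_iff _ _).mp hb
  have hz' : sep.toList = [] → (bs.map String.toList).flatten = [] := by
    intro h
    have hsep : sep = "" := pv_str_eq_of_toList (by simpa using h)
    simp only [List.flatten_eq_nil_iff]
    intro l hl
    rcases List.mem_map.mp hl with ⟨x, hx, rfl⟩
    rw [hz hsep x hx]; rfl
  have hlen : PySem.Str.len sep = (sep.toList.length : Int) := PySem.Str.len_eq sep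
  simp only [pv_join_toList, List.map_append, List.map_cons, List.map_nil, List.flatten_append,
    List.flatten_cons, List.flatten_nil, PySem.Str.toList_slice, hlen]
  have := pv_slice_append sep.toList (bs.map String.toList).flatten b.toList hsuf hz'
  simp only [List.append_nil]
  simp only [PySem.Chars.slice_eq_listSlice, String.length_toList] at this ⊢
  rw [this, List.append_assoc]
  simp

-- one loop step preserves the invariant
lemma pv_rel_step (sep w : String) (dec res buf : List String) (m : Bool)
    (h : pvRel sep dec m res buf) :
    pvRel sep (decode_bpe_astep sep (dec, m) w).1 (decode_bpe_astep sep (dec, m) w).2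
      (decode_bpe_bstep sep (res, buf) w).1 (decode_bpe_bstep sep (res, buf) w).2 := by
  have hjw : PySem.Str.join "" [w] = w := pv_str_eq_of_toList (by simp)
  rcases h with ⟨hm, hbuf, hdec⟩ | ⟨hm, bs, b, hbuf, hdec, hb, hz⟩
  · subst hm; subst hbuf; subst hdec
    by_cases he : PySem.Str.endswith w sep = true
    · right
      refine ⟨by simp [decode_bpe_astep, he, -PySem.Str.endswith_eq], [], w, ?_⟩
      simp [decode_bpe_astep, decode_bpe_bstep, he, hjw, -PySem.Str.endswith_eq]
    · left
      rw [Bool.not_eq_true] at he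
      refine ⟨by simp [decode_bpe_astep, he, -PySem.Str.endswith_eq],
        by simp [decode_bpe_bstep, he, -PySem.Str.endswith_eq], ?_⟩
      simp [decode_bpe_astep, decode_bpe_bstep, he, hjw, -PySem.Str.endswith_eq]
  · subst hm; subst hbuf; subst hdec
    have hne : bs ++ [b] ≠ [] := by simp
    have hlast : ((res ++ [PySem.Str.join "" (bs ++ [b])]).getLastD "") =
        PySem.Str.join "" (bs ++ [b]) := by simp
    have hdrop : (res ++ [PySem.Str.join "" (bs ++ [b])]).dropLast = res := by simp
    have hmerge := pv_merge_eq sep w bs b hb hz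
    have hstrip0 : sep = "" → PySem.Str.slice b none (some (-(PySem.Str.len sep))) = "" := by
      intro hsep; subst hsep
      apply pv_str_eq_of_toList
      have h0 : (-(PySem.Str.len "")) = ((0 : Nat) : Int) := by decide
      rw [PySem.Str.toList_slice, h0, PySem.Chars.slice_eq_listSlice,
        PySem.List.slice_to_natCast]
      simp
    by_cases he : PySem.Str.endswith w sep = true
    · right
      refine ⟨by simp [decode_bpe_astep, he, -PySem.Str.endswith_eq],
        bs ++ [PySem.Str.slice b none (some (-(PySem.Str.len sep)))], w, ?_⟩
      simp only [decode_bpe_astep, decode_bpe_bstep, he, if_pos, hne, ne_eq,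
        not_false_eq_true, Bool.true_eq_false, if_false]
      refine ⟨by simp, ?_, trivial, ?_⟩
      · simp only [hlast, hdrop, List.dropLast_concat]
        rw [hmerge]; simp
      · intro hsep x hx
        rcases List.mem_append.mp hx with hx | hx
        · exact hz hsep x hx
        · have hx' : x = PySem.Str.slice b none (some (-(PySem.Str.len sep))) := by simpa using hx
          rw [hx']; exact hstrip0 hsep
    · left
      rw [Bool.not_eq_true] at he
      refine ⟨by simp [decode_bpe_astep, he, -PySem.Str.endswith_eq],
        by simp [decode_bpe_bstep, he, -PySem.Str.endswith_eq], ?_⟩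
      simp only [decode_bpe_astep, decode_bpe_bstep, he, if_pos, hne, ne_eq,
        not_false_eq_true]
      simp only [hlast, hdrop, List.dropLast_concat]
      rw [hmerge]
      simp

-- the loops carry the invariant to the end
lemma pv_loop (sep : String) (ws : List String) :
    ∀ (dec res buf : List String) (m : Bool), pvRel sep dec m res buf →
      (ws.foldl (decode_bpe_astep sep) (dec, m)).1 =
        (let st := ws.foldl (decode_bpe_bstep sep) (res, buf)
         if st.2 ≠ [] then st.1 ++ [PySem.Str.join "" st.2] else st.1) := by
  induction ws with
  | nil =>
    intro dec res buf m h
    rcases h with ⟨_, hbuf, hdec⟩ | ⟨_, bs, b, hbuf, hdec, _, _⟩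
    · simp [hbuf, hdec]
    · simp [hbuf, hdec]
  | cons w ws ih =>
    intro dec res buf m h
    have := pv_rel_step sep w dec res buf m h
    simpa [List.foldl_cons] using
      ih (decode_bpe_astep sep (dec, m) w).1 (decode_bpe_bstep sep (res, buf) w).1
        (decode_bpe_bstep sep (res, buf) w).2 (decode_bpe_astep sep (dec, m) w).2 this

-- ===== VERDICT (by name: the statement is the Claim_ definition above) =====
theorem decode_bpe_spec : Claim_equal_decode_bpe := by
  intro sentence separator _
  unfold Spec_decode_bpe decode_bpe decode_bpe_alt
  exact pv_loop separator sentence [] [] [] false (Or.inl ⟨rfl, rfl, rfl⟩)
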